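-- pv_equiv track=rewrite | github.com/71261121/auto-jarvis- | core/autonomous/executor.py | _basic_code_analysis
-- ===== SOURCE A (Python) =====
-- from typing import Dict, Any, Optional, List, Union
--
-- def _basic_code_analysis(content: str) -> Dict[str, Any]:
--     """Perform basic code analysis"""
--     lines = content.splitlines()
--
--     return {
--         'lines': len(lines),
--         'characters': len(content),
--         'functions': len([l for l in lines if l.strip().startswith('def ')]),
--         'classes': len([l for l in lines if l.strip().startswith('class ')]),
--         'imports': len([l for l in lines if 'import ' in l]),
--         'comments': len([l for l in lines if l.strip().startswith('#')]),
--         'empty_lines': len([l for l in lines if not l.strip()]),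
--     }
-- ===== SOURCE B (Python) =====
-- def _line_tags(l):
--     """Classify a line into exactly one category tag (the categories are
--     mutually exclusive), plus an extra 'imports' tag when the raw line
--     contains 'import '."""
--     s = l.strip()
--     if not s:
--         tag = 'empty_lines'
--     elif s.startswith('#'):
--         tag = 'comments'
--     elif s.startswith('def '):
--         tag = 'functions'
--     elif s.startswith('class '):
--         tag = 'classes'
--     else:
--         tag = 'code'
--     return [tag, 'imports'] if 'import ' in l else [tag]
--
-- def _basic_code_analysis(content: str):
--     """Basic code analysis: map each line to a stream of category tags,
--     then tally the tag stream with one dict counter."""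
--     lines = content.splitlines()
--     tags = [t for l in lines for t in _line_tags(l)]
--     tally = {}
--     for t in tags:
--         tally[t] = tally.get(t, 0) + 1
--     return {
--         'lines': len(lines),
--         'characters': len(content),
--         'functions': tally.get('functions', 0),
--         'classes': tally.get('classes', 0),
--         'imports': tally.get('imports', 0),
--         'comments': tally.get('comments', 0),
--         'empty_lines': tally.get('empty_lines', 0),
--     }
-- ===== Notes on version B (the rewrite author's own statement) =====
-- stated objective: alternative
-- what changed: A's five independent filter passes are replaced by a mutually-exclusive classification of each line into one category tag (elif chain, plus an extra 'imports' tag), producing a tag stream that is tallied once with a dict counter; the proof establishes the disjointness of A's predicates.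
import Mathlib
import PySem

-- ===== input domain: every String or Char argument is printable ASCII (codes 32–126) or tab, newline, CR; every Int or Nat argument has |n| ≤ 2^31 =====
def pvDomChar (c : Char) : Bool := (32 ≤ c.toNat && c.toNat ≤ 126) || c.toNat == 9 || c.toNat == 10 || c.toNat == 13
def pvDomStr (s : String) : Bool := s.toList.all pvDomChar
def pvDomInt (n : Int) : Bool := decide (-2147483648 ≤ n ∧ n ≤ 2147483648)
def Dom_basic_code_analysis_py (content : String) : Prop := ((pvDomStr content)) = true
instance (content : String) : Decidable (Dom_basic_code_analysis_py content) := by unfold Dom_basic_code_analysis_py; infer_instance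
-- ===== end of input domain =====

-- B replaces A's five independent filter passes by a mutually-exclusive per-line classification into a tag stream tallied once with a dict counter; objective: alternative.


-- ===== PORT A =====
def basic_code_analysis_py (content : String) : List (String × Int) :=
  let lines := PySem.Str.splitlines content
  [("lines", (lines.length : Int)),
   ("characters", (PySem.Str.len content : Int)),
   ("functions", ((lines.filter (fun l => PySem.Str.startswith (PySem.Str.strip l) "def ")).length : Int)),
   ("classes", ((lines.filter (fun l => PySem.Str.startswith (PySem.Str.strip l) "class ")).length : Int)),
   ("imports", ((lines.filter (fun l => PySem.Str.isIn "import " l)).length : Int)),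
   ("comments", ((lines.filter (fun l => PySem.Str.startswith (PySem.Str.strip l) "#")).length : Int)),
   ("empty_lines", ((lines.filter (fun l => !(PySem.Str.len (PySem.Str.strip l) ≠ 0 : Bool))).length : Int))]

-- ===== PORT B =====
-- each line gets exactly one category tag (the elif chain makes the categories
-- mutually exclusive), plus an extra "imports" tag when the raw line contains "import "
def bca_line_tags (l : String) : List String :=
  let s := PySem.Str.strip l
  let tag :=
    if PySem.Str.len s = 0 then "empty_lines"
    else if PySem.Str.startswith s "#" then "comments"
    else if PySem.Str.startswith s "def " then "functions"
    else if PySem.Str.startswith s "class " then "classes"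
    else "code"
  if PySem.Str.isIn "import " l then [tag, "imports"] else [tag]

def basic_code_analysis_py_alt (content : String) : List (String × Int) :=
  let lines := PySem.Str.splitlines content
  let tags := lines.flatMap bca_line_tags
  let tally := tags.foldl (fun d t => d.insert t (d.getD t 0 + 1)) PySem.Dict.empty
  [("lines", (lines.length : Int)),
   ("characters", (PySem.Str.len content : Int)),
   ("functions", tally.getD "functions" 0),
   ("classes", tally.getD "classes" 0),
   ("imports", tally.getD "imports" 0),
   ("comments", tally.getD "comments" 0),
   ("empty_lines", tally.getD "empty_lines" 0)]

-- ===== PRECONDITION & SPEC =====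
def Spec_basic_code_analysis_py (content : String) (out : List (String × Int)) : Prop := out = basic_code_analysis_py_alt content
instance (content : String) (out : List (String × Int)) : Decidable (Spec_basic_code_analysis_py content out) := by unfold Spec_basic_code_analysis_py; infer_instance

-- ===== CLAIM =====
def Claim_equal_basic_code_analysis_py : Prop := ∀ (content : String), Dom_basic_code_analysis_py content → Spec_basic_code_analysis_py content (basic_code_analysis_py content)

-- ===== LEMMAS AND PROOFS =====

-- two nonempty prefixes of the same list start with the same character
theorem startswith_ne_head (cs : List Char) (a b : Char) (p q : List Char) (hab : a ≠ b)
    (h : PySem.Chars.startswith cs (a :: p) = true) : PySem.Chars.startswith cs (b :: q) = false := by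
  rw [PySem.Chars.startswith_iff] at h
  by_contra hq
  rw [Bool.not_eq_false, PySem.Chars.startswith_iff] at hq
  obtain ⟨t, ht⟩ := h
  obtain ⟨u, hu⟩ := hq
  rw [← ht] at hu
  simp at hu
  exact hab hu.1.symm

theorem startswith_ne_nil (cs : List Char) (a : Char) (p : List Char)
    (h : PySem.Chars.startswith cs (a :: p) = true) : cs ≠ [] := by
  rw [PySem.Chars.startswith_iff] at h
  obtain ⟨t, ht⟩ := h
  intro hnil
  simp [hnil] at ht

-- generic: counting one tag in the flatMap'd tag stream is a filter length
theorem count_flatMap_eq_filter_length {α : Type} (f : α → List String) (p : α → Bool) (k : String)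
    (h : ∀ a, (f a).count k = if p a then 1 else 0) :
    ∀ l : List α, ((l.flatMap f).count k : Int) = ((l.filter p).length : Int) := by
  intro l
  induction l with
  | nil => simp
  | cons x xs ih =>
    rw [List.flatMap_cons, List.count_append, List.filter_cons, h x]
    split_ifs <;> simp <;> omega

-- per-line counts of each tag
theorem tags_count_functions (l : String) :
    (bca_line_tags l).count "functions" = if PySem.Str.startswith (PySem.Str.strip l) "def " then 1 else 0 := by
  unfold bca_line_tags
  have hne := startswith_ne_nil (PySem.Str.strip l).toList 'd' "ef ".toList
  have hh := startswith_ne_head (PySem.Str.strip l).toList 'd' '#' "ef ".toList "".toList (by decide)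
  simp only [PySem.Str.startswith_eq, PySem.Str.len_eq] at *
  split_ifs <;> simp_all [List.length_eq_zero_iff]

theorem tags_count_classes (l : String) :
    (bca_line_tags l).count "classes" = if PySem.Str.startswith (PySem.Str.strip l) "class " then 1 else 0 := by
  unfold bca_line_tags
  have hne := startswith_ne_nil (PySem.Str.strip l).toList 'c' "lass ".toList
  have hh := startswith_ne_head (PySem.Str.strip l).toList 'c' '#' "lass ".toList "".toList (by decide)
  have hd := startswith_ne_head (PySem.Str.strip l).toList 'c' 'd' "lass ".toList "ef ".toList (by decide)
  simp only [PySem.Str.startswith_eq, PySem.Str.len_eq] at *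
  split_ifs <;> simp_all [List.length_eq_zero_iff]

theorem tags_count_comments (l : String) :
    (bca_line_tags l).count "comments" = if PySem.Str.startswith (PySem.Str.strip l) "#" then 1 else 0 := by
  unfold bca_line_tags
  have hne := startswith_ne_nil (PySem.Str.strip l).toList '#' "".toList
  simp only [PySem.Str.startswith_eq, PySem.Str.len_eq] at *
  split_ifs <;> simp_all [List.length_eq_zero_iff]

theorem tags_count_empty (l : String) :
    (bca_line_tags l).count "empty_lines" = if (!(PySem.Str.len (PySem.Str.strip l) ≠ 0 : Bool)) then 1 else 0 := by
  unfold bca_line_tags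
  simp only [PySem.Str.len_eq]
  split_ifs <;> simp_all

theorem tags_count_imports (l : String) :
    (bca_line_tags l).count "imports" = if PySem.Str.isIn "import " l then 1 else 0 := by
  unfold bca_line_tags
  simp only [PySem.Str.startswith_eq, PySem.Str.len_eq] at *
  split_ifs <;> simp_all

-- ===== VERDICT =====
theorem basic_code_analysis_py_spec : Claim_equal_basic_code_analysis_py := by
  intro content _
  unfold Spec_basic_code_analysis_py basic_code_analysis_py basic_code_analysis_py_alt
  simp only [PySem.Dict.getD_foldl_insert_add_one, PySem.Dict.getD_empty, zero_add]
  rw [count_flatMap_eq_filter_length bca_line_tags _ "functions" tags_count_functions,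
      count_flatMap_eq_filter_length bca_line_tags _ "classes" tags_count_classes,
      count_flatMap_eq_filter_length bca_line_tags _ "imports" tags_count_imports,
      count_flatMap_eq_filter_length bca_line_tags _ "comments" tags_count_comments,
      count_flatMap_eq_filter_length bca_line_tags _ "empty_lines" tags_count_empty]
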